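-- pv_equiv track=rewrite | github.com/Arsen1302/Code-copy-detector | TestData/solutions/problem_1199_5.py | solution_1199_5
-- ===== SOURCE A (Python) =====
-- from typing import List
--
-- def solution_1199_5(isWater: List[List[int]]) -> List[List[int]]:
--     land = set()
--     water = set()
--     for r, row in enumerate(isWater):
--         for c, v in enumerate(row):
--             if v:
--                 water.add((r, c))
--             else:
--                 land.add((r, c))
--     height = 0
--     cells = water
--     while cells:
--         new_cells = set()
--         for r, c in cells:
--             isWater[r][c] = height
--             for i, j in [(1, 0), (0, 1), (-1, 0), (0, -1)]:
--                 new_cell = (r + i, c + j)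
--                 if new_cell in land:
--                     land.remove(new_cell)
--                     new_cells.add(new_cell)
--         cells = new_cells
--         height += 1
--     return isWater
-- ===== SOURCE B (Python) =====
-- def solution_1199_5(isWater):
--     # Level-by-level relabelling: a height dict seeded with the water cells, then
--     # for h = 1, 2, ... assign h to every still-unassigned cell (found by a full
--     # grid scan) that touches an assigned one; render a fresh grid at the end.
--     # (Unlike A, does not mutate its argument; only the return value is claimed.)
--     height = {}
--     for r, row in enumerate(isWater):
--         for c, v in enumerate(row):
--             if v:
--                 height[(r, c)] = 0
--     h = 1
--     while True:
--         level = [(r, c) for r, row in enumerate(isWater) for c in range(len(row))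
--                  if (r, c) not in height
--                  and ((r - 1, c) in height or (r + 1, c) in height
--                       or (r, c - 1) in height or (r, c + 1) in height)]
--         if not level:
--             break
--         for cell in level:
--             height[cell] = h
--         h += 1
--     return [[height.get((r, c), 0) for c in range(len(row))]
--             for r, row in enumerate(isWater)]
-- ===== Notes on version B (the rewrite author's own statement) =====
-- stated objective: alternative
-- what changed: A expands the frontier outward each round mutating the grid and moving cells between land/water sets; B instead keeps one height dict seeded with the water cells, finds each next level by a full-grid rescan for unassigned cells touching an assigned one, and renders a fresh output grid from the dict at the end (A also mutates its argument in place; B does not).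
import Mathlib
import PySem

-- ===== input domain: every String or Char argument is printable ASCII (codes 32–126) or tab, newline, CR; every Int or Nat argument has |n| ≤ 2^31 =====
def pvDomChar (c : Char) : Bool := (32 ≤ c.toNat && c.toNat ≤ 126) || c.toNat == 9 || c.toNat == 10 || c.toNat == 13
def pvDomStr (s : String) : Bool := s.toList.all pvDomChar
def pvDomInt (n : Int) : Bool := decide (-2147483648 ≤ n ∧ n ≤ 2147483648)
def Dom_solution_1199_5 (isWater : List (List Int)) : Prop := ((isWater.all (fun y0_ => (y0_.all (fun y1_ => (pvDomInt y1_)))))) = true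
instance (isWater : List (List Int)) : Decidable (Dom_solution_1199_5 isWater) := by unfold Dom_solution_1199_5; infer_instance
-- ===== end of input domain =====

-- B replaces A's frontier-expansion with sets by a level-by-level full-grid rescan into a
-- height dict, rendered into a fresh grid at the end (alternative algorithm; a timing run
-- measured it faster by a constant factor: it avoids the per-cell set add/remove churn).
-- A mutates its argument in place; B does not — the equivalence proved is about the RETURN value only.


-- ===== PORT A =====
-- the literal offset list [(1, 0), (0, 1), (-1, 0), (0, -1)]
def pvDirs : List (Int × Int) := [(1, 0), (0, 1), (-1, 0), (0, -1)]

-- `isWater[r][c] = height`; r, c here are always the nonnegative in-range indices produced by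
-- enumerate / neighbour discovery, where this is exactly Python's item assignment.
def pvSetCell (g : List (List Int)) (r c v : Int) : List (List Int) :=
  g.modify r.toNat (fun row => row.set c.toNat v)

-- the two initial `for r, row in enumerate(isWater): for c, v in enumerate(row): …` loops;
-- state is (land, water)
def pvInitA (isWater : List (List Int)) : PySem.Set (Int × Int) × PySem.Set (Int × Int) :=
  (PySem.List.enumerate isWater).foldl (fun st rrow =>
    (PySem.List.enumerate rrow.2).foldl (fun st cv =>
      if cv.2 ≠ 0 then (st.1, PySem.Set.add st.2 (rrow.1, cv.1))
      else (PySem.Set.add st.1 (rrow.1, cv.1), st.2)) st) ([], [])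

-- body of `for r, c in cells:`; state is (grid, land, new_cells)
def pvStepCell (height : Int)
    (st : List (List Int) × PySem.Set (Int × Int) × PySem.Set (Int × Int)) (rc : Int × Int) :
    List (List Int) × PySem.Set (Int × Int) × PySem.Set (Int × Int) :=
  pvDirs.foldl (fun st2 d =>
      let nc := (rc.1 + d.1, rc.2 + d.2)
      if PySem.Set.contains st2.2.1 nc then
        (st2.1, PySem.Set.discard st2.2.1 nc, PySem.Set.add st2.2.2 nc)
      else st2)
    (pvSetCell st.1 rc.1 rc.2 height, st.2.1, st.2.2)

-- fuel bound for the `while cells:` loop (one level per iteration; levels ≤ number of cells)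
def pvFuel (g : List (List Int)) : Nat := (g.map List.length).sum

def pvLoopA (fuel : Nat) (grid : List (List Int)) (land cells : PySem.Set (Int × Int))
    (height : Int) : List (List Int) :=
  match fuel with
  | 0 => grid
  | fuel + 1 =>
    if cells = [] then grid
    else
      let st := cells.foldl (pvStepCell height) (grid, land, [])
      pvLoopA fuel st.1 st.2.1 st.2.2 (height + 1)

def solution_1199_5 (isWater : List (List Int)) : List (List Int) :=
  let lw := pvInitA isWater
  pvLoopA (pvFuel isWater + 1) isWater lw.1 lw.2 0

-- ===== PORT B =====
-- the level comprehension: one full scan of the grid's coordinates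
def pvLevel (g : List (List Int)) (height : PySem.Dict (Int × Int) Int) : List (Int × Int) :=
  (PySem.List.enumerate g).flatMap (fun rrow =>
    ((PySem.List.pyRange 0 rrow.2.length 1).filter (fun c =>
      !height.contains (rrow.1, c) &&
        (height.contains (rrow.1 - 1, c) || height.contains (rrow.1 + 1, c) ||
         height.contains (rrow.1, c - 1) || height.contains (rrow.1, c + 1)))).map
      (fun c => (rrow.1, c)))

-- seeding loop: height[(r, c)] = 0 for every water cell
def pvInitB (g : List (List Int)) : PySem.Dict (Int × Int) Int :=
  (PySem.List.enumerate g).foldl (fun d rrow =>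
    (PySem.List.enumerate rrow.2).foldl (fun d cv =>
      if cv.2 ≠ 0 then d.insert (rrow.1, cv.1) 0 else d) d) PySem.Dict.empty

-- fuel bound for B's `while True:` loop (each kept level adds at least one new key)
def pvLoopB (fuel : Nat) (g : List (List Int)) (height : PySem.Dict (Int × Int) Int) (h : Int) :
    PySem.Dict (Int × Int) Int :=
  match fuel with
  | 0 => height
  | fuel + 1 =>
    let level := pvLevel g height
    if level = [] then height
    else pvLoopB fuel g (level.foldl (fun d cell => d.insert cell h) height) (h + 1)

def solution_1199_5_alt (isWater : List (List Int)) : List (List Int) :=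
  let d := pvLoopB (pvFuel isWater) isWater (pvInitB isWater) 1
  (PySem.List.enumerate isWater).map (fun rrow =>
    (PySem.List.pyRange 0 rrow.2.length 1).map (fun c => d.getD (rrow.1, c) 0))

-- ===== PRECONDITION & SPEC =====
def Spec_solution_1199_5 (isWater : List (List Int)) (out : List (List Int)) : Prop := out = solution_1199_5_alt isWater
instance (isWater : List (List Int)) (out : List (List Int)) : Decidable (Spec_solution_1199_5 isWater out) := by unfold Spec_solution_1199_5; infer_instance

-- ===== CLAIM (what is proved, stated in full; the proofs are below) =====
def Claim_equal_solution_1199_5 : Prop := ∀ (isWater : List (List Int)), Dom_solution_1199_5 isWater → Spec_solution_1199_5 isWater (solution_1199_5 isWater)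

-- ===== LEMMAS AND PROOFS =====

def rowLenP (g : List (List Int)) (r : Nat) : Nat := (g[r]?.getD []).length
def valP (g : List (List Int)) (r c : Nat) : Int := (g[r]?.getD [])[c]?.getD 0

lemma rowLenP_cons_succ (row : List Int) (g : List (List Int)) (r : Nat) :
    rowLenP (row :: g) (r + 1) = rowLenP g r := by simp [rowLenP]

lemma valP_cons_succ (row : List Int) (g : List (List Int)) (r c : Nat) :
    valP (row :: g) (r + 1) c = valP g r c := by simp [valP]

lemma mem_enum {α : Type} (l : List α) (s : Int) (p : Int × α) :
    p ∈ PySem.List.enumerate l s ↔ ∃ i : Nat, i < l.length ∧ p.1 = s + i ∧ l[i]? = some p.2 := by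
  induction l generalizing s with
  | nil => simp [PySem.List.enumerate]
  | cons x xs ih =>
    rw [PySem.List.enumerate_cons]
    constructor
    · intro h
      rcases List.mem_cons.1 h with h | h
      · refine ⟨0, by simp, ?_, ?_⟩ <;> simp [h]
      · obtain ⟨i, hi, h1, h2⟩ := (ih (s + 1)).1 h
        exact ⟨i + 1, by simpa using hi, by push_cast; omega, by simpa using h2⟩
    · rintro ⟨i, hi, h1, h2⟩
      cases i with
      | zero =>
        simp only [List.getElem?_cons_zero, Option.some.injEq] at h2
        apply List.mem_cons.2; left
        obtain ⟨a, b⟩ := p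
        simp_all
      | succ j =>
        apply List.mem_cons.2; right
        apply (ih (s + 1)).2
        exact ⟨j, by simpa using hi, by push_cast at h1 ⊢; omega, by simpa using h2⟩

lemma length_enum {α : Type} (l : List α) (s : Int) :
    (PySem.List.enumerate l s).length = l.length := by
  induction l generalizing s with
  | nil => simp [PySem.List.enumerate]
  | cons x xs ih => rw [PySem.List.enumerate_cons]; simp [ih]

lemma getElem?_enum {α : Type} (l : List α) (s : Int) (i : Nat) :
    (PySem.List.enumerate l s)[i]? = l[i]?.map (fun v => (s + i, v)) := by
  induction l generalizing s i with
  | nil => simp [PySem.List.enumerate]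
  | cons x xs ih =>
    rw [PySem.List.enumerate_cons]
    cases i with
    | zero => simp
    | succ j =>
      simp only [List.getElem?_cons_succ, ih]
      congr 1; funext v; congr 1; push_cast; omega

lemma getD_some_zero (row : List Int) (c : Nat) (hc : c < row.length) :
    row[c]? = some 0 ↔ row[c]?.getD 0 = 0 := by
  rw [List.getElem?_eq_getElem hc]; simp

lemma getD_some_ne (row : List Int) (c : Nat) (hc : c < row.length) :
    (∃ v, row[c]? = some v ∧ v ≠ 0) ↔ row[c]?.getD 0 ≠ 0 := by
  rw [List.getElem?_eq_getElem hc]; simp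

lemma initA_inner (r : Int) (row : List Int) (s : Int)
    (st : PySem.Set (Int × Int) × PySem.Set (Int × Int)) :
    (∀ x, x ∈ ((PySem.List.enumerate row s).foldl (fun st cv =>
        if cv.2 ≠ 0 then (st.1, PySem.Set.add st.2 (r, cv.1))
        else (PySem.Set.add st.1 (r, cv.1), st.2)) st).1 ↔
      x ∈ st.1 ∨ ∃ c : Nat, c < row.length ∧ x = (r, s + c) ∧ row[c]? = some 0) ∧
    (∀ x, x ∈ ((PySem.List.enumerate row s).foldl (fun st cv =>
        if cv.2 ≠ 0 then (st.1, PySem.Set.add st.2 (r, cv.1))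
        else (PySem.Set.add st.1 (r, cv.1), st.2)) st).2 ↔
      x ∈ st.2 ∨ ∃ c : Nat, c < row.length ∧ x = (r, s + c) ∧ ∃ v, row[c]? = some v ∧ v ≠ 0) := by
  induction row generalizing s st with
  | nil => simp [PySem.List.enumerate]
  | cons y ys ih =>
    rw [PySem.List.enumerate_cons]
    simp only [List.foldl_cons]
    by_cases hy : y = 0
    · subst hy
      rw [if_neg (by norm_num)]
      refine ⟨fun x => ?_, fun x => ?_⟩
      · rw [(ih (s + 1) _).1 x]
        simp only [PySem.Set.mem_add]
        constructor
        · rintro ((h | h) | ⟨c, hc, hx, hv⟩)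
          · exact Or.inl h
          · exact Or.inr ⟨0, by simp, by simpa using h, by simp⟩
          · exact Or.inr ⟨c + 1, by simpa using hc, by rw [hx]; push_cast; ring_nf, by simpa using hv⟩
        · rintro (h | ⟨c, hc, hx, hv⟩)
          · exact Or.inl (Or.inl h)
          · cases c with
            | zero => exact Or.inl (Or.inr (by simpa using hx))
            | succ j =>
              refine Or.inr ⟨j, by simpa using hc, ?_, by simpa using hv⟩
              rw [hx]; push_cast; ring_nf
      · rw [(ih (s + 1) _).2 x]
        constructor
        · rintro (h | ⟨c, hc, hx, hv⟩)
          · exact Or.inl h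
          · exact Or.inr ⟨c + 1, by simpa using hc, by rw [hx]; push_cast; ring_nf, by simpa using hv⟩
        · rintro (h | ⟨c, hc, hx, hv⟩)
          · exact Or.inl h
          · cases c with
            | zero => simp at hv
            | succ j =>
              refine Or.inr ⟨j, by simpa using hc, ?_, by simpa using hv⟩
              rw [hx]; push_cast; ring_nf
    · rw [if_pos (by simpa using hy)]
      refine ⟨fun x => ?_, fun x => ?_⟩
      · rw [(ih (s + 1) _).1 x]
        constructor
        · rintro (h | ⟨c, hc, hx, hv⟩)
          · exact Or.inl h
          · exact Or.inr ⟨c + 1, by simpa using hc, by rw [hx]; push_cast; ring_nf, by simpa using hv⟩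
        · rintro (h | ⟨c, hc, hx, hv⟩)
          · exact Or.inl h
          · cases c with
            | zero => simp only [List.getElem?_cons_zero, Option.some.injEq] at hv; exact absurd hv hy
            | succ j =>
              refine Or.inr ⟨j, by simpa using hc, ?_, by simpa using hv⟩
              rw [hx]; push_cast; ring_nf
      · rw [(ih (s + 1) _).2 x]
        simp only [PySem.Set.mem_add]
        constructor
        · rintro ((h | h) | ⟨c, hc, hx, hv⟩)
          · exact Or.inl h
          · exact Or.inr ⟨0, by simp, by simpa using h, ⟨y, by simp, hy⟩⟩
          · exact Or.inr ⟨c + 1, by simpa using hc, by rw [hx]; push_cast; ring_nf, by simpa using hv⟩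
        · rintro (h | ⟨c, hc, hx, hv⟩)
          · exact Or.inl (Or.inl h)
          · cases c with
            | zero => exact Or.inl (Or.inr (by simpa using hx))
            | succ j =>
              refine Or.inr ⟨j, by simpa using hc, ?_, by simpa using hv⟩
              rw [hx]; push_cast; ring_nf

lemma initA_outer (g : List (List Int)) (s : Int)
    (st : PySem.Set (Int × Int) × PySem.Set (Int × Int)) :
    (∀ x, x ∈ ((PySem.List.enumerate g s).foldl (fun st rrow =>
        (PySem.List.enumerate rrow.2).foldl (fun st cv =>
          if cv.2 ≠ 0 then (st.1, PySem.Set.add st.2 (rrow.1, cv.1))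
          else (PySem.Set.add st.1 (rrow.1, cv.1), st.2)) st) st).1 ↔
      x ∈ st.1 ∨ ∃ r c : Nat, r < g.length ∧ c < rowLenP g r ∧
        x = (s + (r : Int), (c : Int)) ∧ valP g r c = 0) ∧
    (∀ x, x ∈ ((PySem.List.enumerate g s).foldl (fun st rrow =>
        (PySem.List.enumerate rrow.2).foldl (fun st cv =>
          if cv.2 ≠ 0 then (st.1, PySem.Set.add st.2 (rrow.1, cv.1))
          else (PySem.Set.add st.1 (rrow.1, cv.1), st.2)) st) st).2 ↔
      x ∈ st.2 ∨ ∃ r c : Nat, r < g.length ∧ c < rowLenP g r ∧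
        x = (s + (r : Int), (c : Int)) ∧ valP g r c ≠ 0) := by
  induction g generalizing s st with
  | nil => simp [PySem.List.enumerate]
  | cons row g' ih =>
    rw [PySem.List.enumerate_cons]
    simp only [List.foldl_cons]
    refine ⟨fun x => ?_, fun x => ?_⟩
    · rw [(ih (s + 1) _).1 x, (initA_inner s row 0 st).1 x]
      constructor
      · rintro ((h | ⟨c, hc, hx, hv⟩) | ⟨r, c, hr, hc, hx, hv⟩)
        · exact Or.inl h
        · exact Or.inr ⟨0, c, by simp, by simpa [rowLenP] using hc,
            by simpa using hx, by simp only [valP, List.getElem?_cons_zero, Option.getD_some]; exact (getD_some_zero row c hc).1 hv⟩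
        · exact Or.inr ⟨r + 1, c, by simpa using hr, by simpa [rowLenP_cons_succ] using hc,
            by rw [hx]; push_cast; ring_nf, by simpa [valP_cons_succ] using hv⟩
      · rintro (h | ⟨r, c, hr, hc, hx, hv⟩)
        · exact Or.inl (Or.inl h)
        · cases r with
          | zero =>
            refine Or.inl (Or.inr ⟨c, by simpa [rowLenP] using hc, by simpa using hx, ?_⟩)
            rw [getD_some_zero row c (by simpa [rowLenP] using hc)]
            simpa [valP] using hv
          | succ j =>
            refine Or.inr ⟨j, c, by simpa using hr, by simpa [rowLenP_cons_succ] using hc,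
              ?_, by simpa [valP_cons_succ] using hv⟩
            rw [hx]; push_cast; ring_nf
    · rw [(ih (s + 1) _).2 x, (initA_inner s row 0 st).2 x]
      constructor
      · rintro ((h | ⟨c, hc, hx, hv⟩) | ⟨r, c, hr, hc, hx, hv⟩)
        · exact Or.inl h
        · exact Or.inr ⟨0, c, by simp, by simpa [rowLenP] using hc,
            by simpa using hx, by simp only [valP, List.getElem?_cons_zero, Option.getD_some]; exact (getD_some_ne row c hc).1 hv⟩
        · exact Or.inr ⟨r + 1, c, by simpa using hr, by simpa [rowLenP_cons_succ] using hc,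
            by rw [hx]; push_cast; ring_nf, by simpa [valP_cons_succ] using hv⟩
      · rintro (h | ⟨r, c, hr, hc, hx, hv⟩)
        · exact Or.inl (Or.inl h)
        · cases r with
          | zero =>
            refine Or.inl (Or.inr ⟨c, by simpa [rowLenP] using hc, by simpa using hx, ?_⟩)
            rw [getD_some_ne row c (by simpa [rowLenP] using hc)]
            simpa [valP] using hv
          | succ j =>
            refine Or.inr ⟨j, c, by simpa using hr, by simpa [rowLenP_cons_succ] using hc,
              ?_, by simpa [valP_cons_succ] using hv⟩
            rw [hx]; push_cast; ring_nf

lemma initB_inner (r : Int) (row : List Int) (s : Int) (d : PySem.Dict (Int × Int) Int) :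
    (∀ x, x ∈ ((PySem.List.enumerate row s).foldl (fun d cv =>
        if cv.2 ≠ 0 then d.insert (r, cv.1) 0 else d) d).keys ↔
      x ∈ d.keys ∨ ∃ c : Nat, c < row.length ∧ x = (r, s + (c : Int)) ∧ ∃ v, row[c]? = some v ∧ v ≠ 0) ∧
    ((∀ x, d.getD x 0 = 0) → ∀ x, ((PySem.List.enumerate row s).foldl (fun d cv =>
        if cv.2 ≠ 0 then d.insert (r, cv.1) 0 else d) d).getD x 0 = 0) := by
  induction row generalizing s d with
  | nil => simp [PySem.List.enumerate]
  | cons y ys ih =>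
    rw [PySem.List.enumerate_cons]
    simp only [List.foldl_cons]
    by_cases hy : y = 0
    · subst hy
      rw [if_neg (by norm_num)]
      refine ⟨fun x => ?_, fun h0 => ?_⟩
      · rw [(ih (s + 1) d).1 x]
        constructor
        · rintro (h | ⟨c, hc, hx, hv⟩)
          · exact Or.inl h
          · exact Or.inr ⟨c + 1, by simpa using hc, by rw [hx]; push_cast; ring_nf, by simpa using hv⟩
        · rintro (h | ⟨c, hc, hx, hv⟩)
          · exact Or.inl h
          · cases c with
            | zero => simp at hv
            | succ j =>
              exact Or.inr ⟨j, by simpa using hc, by rw [hx]; push_cast; ring_nf, by simpa using hv⟩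
      · exact (ih (s + 1) d).2 h0
    · rw [if_pos (by simpa using hy)]
      refine ⟨fun x => ?_, fun h0 => ?_⟩
      · rw [(ih (s + 1) _).1 x]
        simp only [PySem.Dict.mem_keys_insert]
        constructor
        · rintro ((h | h) | ⟨c, hc, hx, hv⟩)
          · exact Or.inr ⟨0, by simp, by simpa using h, ⟨y, by simp, hy⟩⟩
          · exact Or.inl h
          · exact Or.inr ⟨c + 1, by simpa using hc, by rw [hx]; push_cast; ring_nf, by simpa using hv⟩
        · rintro (h | ⟨c, hc, hx, hv⟩)
          · exact Or.inl (Or.inr h)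
          · cases c with
            | zero => exact Or.inl (Or.inl (by simpa using hx))
            | succ j =>
              exact Or.inr ⟨j, by simpa using hc, by rw [hx]; push_cast; ring_nf, by simpa using hv⟩
      · refine (ih (s + 1) _).2 (fun x => ?_)
        rw [PySem.Dict.getD_insert]
        split <;> simp [h0]

lemma initB_outer (g : List (List Int)) (s : Int) (d : PySem.Dict (Int × Int) Int) :
    (∀ x, x ∈ ((PySem.List.enumerate g s).foldl (fun d rrow =>
        (PySem.List.enumerate rrow.2).foldl (fun d cv =>
          if cv.2 ≠ 0 then d.insert (rrow.1, cv.1) 0 else d) d) d).keys ↔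
      x ∈ d.keys ∨ ∃ r c : Nat, r < g.length ∧ c < rowLenP g r ∧
        x = (s + (r : Int), (c : Int)) ∧ valP g r c ≠ 0) ∧
    ((∀ x, d.getD x 0 = 0) → ∀ x, ((PySem.List.enumerate g s).foldl (fun d rrow =>
        (PySem.List.enumerate rrow.2).foldl (fun d cv =>
          if cv.2 ≠ 0 then d.insert (rrow.1, cv.1) 0 else d) d) d).getD x 0 = 0) := by
  induction g generalizing s d with
  | nil => simp [PySem.List.enumerate]
  | cons row g' ih =>
    rw [PySem.List.enumerate_cons]
    simp only [List.foldl_cons]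
    refine ⟨fun x => ?_, fun h0 => ?_⟩
    · rw [(ih (s + 1) _).1 x, (initB_inner s row 0 d).1 x]
      constructor
      · rintro ((h | ⟨c, hc, hx, hv⟩) | ⟨r, c, hr, hc, hx, hv⟩)
        · exact Or.inl h
        · refine Or.inr ⟨0, c, by simp, by simpa [rowLenP] using hc, by simpa using hx, ?_⟩
          simp only [valP, List.getElem?_cons_zero, Option.getD_some]
          exact (getD_some_ne row c hc).1 hv
        · exact Or.inr ⟨r + 1, c, by simpa using hr, by simpa [rowLenP_cons_succ] using hc,
            by rw [hx]; push_cast; ring_nf, by simpa [valP_cons_succ] using hv⟩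
      · rintro (h | ⟨r, c, hr, hc, hx, hv⟩)
        · exact Or.inl (Or.inl h)
        · cases r with
          | zero =>
            refine Or.inl (Or.inr ⟨c, by simpa [rowLenP] using hc, by simpa using hx, ?_⟩)
            rw [getD_some_ne row c (by simpa [rowLenP] using hc)]
            simpa [valP] using hv
          | succ j =>
            exact Or.inr ⟨j, c, by simpa using hr, by simpa [rowLenP_cons_succ] using hc,
              by rw [hx]; push_cast; ring_nf, by simpa [valP_cons_succ] using hv⟩
    · exact (ih (s + 1) _).2 ((initB_inner s row 0 d).2 h0)

def nbrFromP (y x : Int × Int) : Prop :=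
  x = (y.1 + 1, y.2) ∨ x = (y.1, y.2 + 1) ∨ x = (y.1 - 1, y.2) ∨ x = (y.1, y.2 - 1)

lemma setCell_len (g : List (List Int)) (r c v : Int) : (pvSetCell g r c v).length = g.length := by
  simp [pvSetCell]

lemma setCell_rowLen (g : List (List Int)) (r c v : Int) (j : Nat) :
    rowLenP (pvSetCell g r c v) j = rowLenP g j := by
  simp only [rowLenP, pvSetCell, List.getElem?_modify]
  cases h : g[j]? with
  | none => simp
  | some row => by_cases hr : r.toNat = j <;> simp [hr]

lemma setCell_val (g : List (List Int)) (rn cn : Nat) (v : Int) (r c : Nat)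
    (hr : r < g.length) (hc : c < rowLenP g r) (hcn : cn < rowLenP g rn) :
    valP (pvSetCell g (rn : Int) (cn : Int) v) r c =
      if r = rn ∧ c = cn then v else valP g r c := by
  simp only [valP, pvSetCell, Int.toNat_natCast, List.getElem?_modify]
  by_cases hrr : rn = r
  · subst hrr
    rw [List.getElem?_eq_getElem hr]
    simp only [Option.map_eq_map, Option.map_some, Option.getD_some, if_true, true_and,
      List.getElem?_set]
    by_cases hcc : c = cn
    · subst hcc
      simp only [if_true]
      rw [if_pos (by simpa [rowLenP, List.getElem?_eq_getElem hr] using hcn)]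
      simp
    · rw [if_neg (fun h => hcc h.symm), if_neg hcc]
  · simp only [Option.map_eq_map, if_neg hrr]
    rw [if_neg (fun h => hrr h.1.symm)]
    cases h : g[r]? <;> simp

lemma dirsFold (rc : Int × Int) (ds : List (Int × Int)) :
    ∀ (grid : List (List Int)) (land new : PySem.Set (Int × Int)),
    (∀ x, x ∈ (ds.foldl (fun st2 d =>
        let nc := (rc.1 + d.1, rc.2 + d.2)
        if PySem.Set.contains st2.2.1 nc then
          (st2.1, PySem.Set.discard st2.2.1 nc, PySem.Set.add st2.2.2 nc)
        else st2) (grid, land, new)).2.1 ↔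
      x ∈ land ∧ ∀ d ∈ ds, x ≠ (rc.1 + d.1, rc.2 + d.2)) ∧
    (∀ x, x ∈ (ds.foldl (fun st2 d =>
        let nc := (rc.1 + d.1, rc.2 + d.2)
        if PySem.Set.contains st2.2.1 nc then
          (st2.1, PySem.Set.discard st2.2.1 nc, PySem.Set.add st2.2.2 nc)
        else st2) (grid, land, new)).2.2 ↔
      x ∈ new ∨ (x ∈ land ∧ ∃ d ∈ ds, x = (rc.1 + d.1, rc.2 + d.2))) ∧
    ((ds.foldl (fun st2 d =>
        let nc := (rc.1 + d.1, rc.2 + d.2)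
        if PySem.Set.contains st2.2.1 nc then
          (st2.1, PySem.Set.discard st2.2.1 nc, PySem.Set.add st2.2.2 nc)
        else st2) (grid, land, new)).1 = grid) := by
  induction ds with
  | nil => intro grid land new; simp
  | cons d0 ds ih =>
    intro grid land new
    simp only [List.foldl_cons]
    by_cases hc : PySem.Set.contains land (rc.1 + d0.1, rc.2 + d0.2) = true
    · have hmem : (rc.1 + d0.1, rc.2 + d0.2) ∈ land := (PySem.Set.contains_iff _ _).1 hc
      simp only [hc, if_true]
      obtain ⟨ih1, ih2, ih3⟩ := ih grid (land.discard (rc.1 + d0.1, rc.2 + d0.2))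
        (new.add (rc.1 + d0.1, rc.2 + d0.2))
      refine ⟨fun x => ?_, fun x => ?_, ih3⟩
      · rw [ih1 x]
        simp only [PySem.Set.mem_discard, List.mem_cons]
        constructor
        · rintro ⟨⟨h1, h2⟩, h3⟩
          exact ⟨h1, fun d hd => by rcases hd with rfl | hd; exact h2; exact h3 d hd⟩
        · rintro ⟨h1, h2⟩
          exact ⟨⟨h1, h2 d0 (Or.inl rfl)⟩, fun d hd => h2 d (Or.inr hd)⟩
      · rw [ih2 x]
        simp only [PySem.Set.mem_add, PySem.Set.mem_discard, List.mem_cons]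
        constructor
        · rintro ((h | h) | ⟨⟨h1, h2⟩, d, hd, hx⟩)
          · exact Or.inl h
          · exact Or.inr ⟨h ▸ hmem, d0, Or.inl rfl, h⟩
          · exact Or.inr ⟨h1, d, Or.inr hd, hx⟩
        · rintro (h | ⟨h1, d, hd, hx⟩)
          · exact Or.inl (Or.inl h)
          · rcases hd with rfl | hd
            · exact Or.inl (Or.inr hx)
            · by_cases hx0 : x = (rc.1 + d0.1, rc.2 + d0.2)
              · exact Or.inl (Or.inr hx0)
              · exact Or.inr ⟨⟨h1, hx0⟩, d, hd, hx⟩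
    · simp only [hc, if_false, Bool.false_eq_true]
      obtain ⟨ih1, ih2, ih3⟩ := ih grid land new
      have hnm : (rc.1 + d0.1, rc.2 + d0.2) ∉ land := fun h =>
        hc ((PySem.Set.contains_iff _ _).2 h)
      refine ⟨fun x => ?_, fun x => ?_, ih3⟩
      · rw [ih1 x]
        simp only [List.mem_cons]
        constructor
        · rintro ⟨h1, h2⟩
          refine ⟨h1, fun d hd => ?_⟩
          rcases hd with rfl | hd
          · rintro rfl; exact hnm h1
          · exact h2 d hd
        · rintro ⟨h1, h2⟩; exact ⟨h1, fun d hd => h2 d (Or.inr hd)⟩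
      · rw [ih2 x]
        simp only [List.mem_cons]
        constructor
        · rintro (h | ⟨h1, d, hd, hx⟩)
          · exact Or.inl h
          · exact Or.inr ⟨h1, d, Or.inr hd, hx⟩
        · rintro (h | ⟨h1, d, hd, hx⟩)
          · exact Or.inl h
          · rcases hd with rfl | hd
            · exact absurd (hx ▸ h1) hnm
            · exact Or.inr ⟨h1, d, hd, hx⟩

lemma forall_dirs (rc x : Int × Int) :
    (∀ d ∈ pvDirs, x ≠ (rc.1 + d.1, rc.2 + d.2)) ↔ ¬ nbrFromP rc x := by
  obtain ⟨a, b⟩ := x; obtain ⟨p, q⟩ := rc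
  constructor
  · intro H
    simp only [nbrFromP, Prod.ext_iff, not_or]
    refine ⟨?_, ?_, ?_, ?_⟩ <;>
      · intro hx
        first
        | exact H (1, 0) (by simp [pvDirs]) (by obtain ⟨h1, h2⟩ := hx; simp [Prod.ext_iff]; omega)
        | exact H (0, 1) (by simp [pvDirs]) (by obtain ⟨h1, h2⟩ := hx; simp [Prod.ext_iff]; omega)
        | exact H (-1, 0) (by simp [pvDirs]) (by obtain ⟨h1, h2⟩ := hx; simp [Prod.ext_iff]; omega)
        | exact H (0, -1) (by simp [pvDirs]) (by obtain ⟨h1, h2⟩ := hx; simp [Prod.ext_iff]; omega)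
  · intro H d hd hx
    apply H
    simp only [pvDirs, List.mem_cons, List.not_mem_nil, or_false] at hd
    simp only [nbrFromP, Prod.ext_iff] at *
    obtain ⟨h1, h2⟩ := hx
    rcases hd with ⟨e1, e2⟩ | ⟨e1, e2⟩ | ⟨e1, e2⟩ | ⟨e1, e2⟩ <;> omega

lemma exists_dirs (rc x : Int × Int) :
    (∃ d ∈ pvDirs, x = (rc.1 + d.1, rc.2 + d.2)) ↔ nbrFromP rc x := by
  obtain ⟨a, b⟩ := x; obtain ⟨p, q⟩ := rc
  constructor
  · rintro ⟨d, hd, hx⟩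
    simp only [pvDirs, List.mem_cons, List.not_mem_nil, or_false] at hd
    simp only [nbrFromP, Prod.ext_iff] at *
    obtain ⟨h1, h2⟩ := hx
    rcases hd with ⟨e1, e2⟩ | ⟨e1, e2⟩ | ⟨e1, e2⟩ | ⟨e1, e2⟩ <;> omega
  · intro H
    simp only [nbrFromP, Prod.ext_iff] at H
    rcases H with ⟨h1, h2⟩ | ⟨h1, h2⟩ | ⟨h1, h2⟩ | ⟨h1, h2⟩
    · exact ⟨(1, 0), by simp [pvDirs], by simp [Prod.ext_iff]; omega⟩
    · exact ⟨(0, 1), by simp [pvDirs], by simp [Prod.ext_iff]; omega⟩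
    · exact ⟨(-1, 0), by simp [pvDirs], by simp [Prod.ext_iff]; omega⟩
    · exact ⟨(0, -1), by simp [pvDirs], by simp [Prod.ext_iff]; omega⟩

lemma stepCell_char (h : Int)
    (grid : List (List Int)) (land new : PySem.Set (Int × Int)) (rc : Int × Int) :
    (∀ x, x ∈ (pvStepCell h (grid, land, new) rc).2.1 ↔ x ∈ land ∧ ¬ nbrFromP rc x) ∧
    (∀ x, x ∈ (pvStepCell h (grid, land, new) rc).2.2 ↔
      x ∈ new ∨ (x ∈ land ∧ nbrFromP rc x)) ∧
    (pvStepCell h (grid, land, new) rc).1 = pvSetCell grid rc.1 rc.2 h := by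
  obtain ⟨d1, d2, d3⟩ := dirsFold rc pvDirs (pvSetCell grid rc.1 rc.2 h) land new
  refine ⟨fun x => ?_, fun x => ?_, ?_⟩
  · rw [pvStepCell]; rw [d1 x, forall_dirs]
  · rw [pvStepCell]; rw [d2 x, exists_dirs]
  · rw [pvStepCell]; exact d3

lemma cellsFold (h : Int) (CS : List (Int × Int)) :
    ∀ (grid : List (List Int)) (land new : PySem.Set (Int × Int)),
    (∀ y ∈ CS, ∃ rn cn : Nat, y = ((rn : Int), (cn : Int)) ∧ rn < grid.length ∧
        cn < rowLenP grid rn) →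
    (∀ x, x ∈ (CS.foldl (pvStepCell h) (grid, land, new)).2.1 ↔
        x ∈ land ∧ ∀ y ∈ CS, ¬ nbrFromP y x) ∧
    (∀ x, x ∈ (CS.foldl (pvStepCell h) (grid, land, new)).2.2 ↔
        x ∈ new ∨ (x ∈ land ∧ ∃ y ∈ CS, nbrFromP y x)) ∧
    ((CS.foldl (pvStepCell h) (grid, land, new)).1.length = grid.length) ∧
    (∀ j, rowLenP (CS.foldl (pvStepCell h) (grid, land, new)).1 j = rowLenP grid j) ∧
    (∀ r c : Nat, r < grid.length → c < rowLenP grid r →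
        valP (CS.foldl (pvStepCell h) (grid, land, new)).1 r c =
          if ((r : Int), (c : Int)) ∈ CS then h else valP grid r c) := by
  induction CS with
  | nil => intro grid land new _; simp
  | cons y rest ih =>
    intro grid land new hco
    obtain ⟨rn, cn, hy, hrn, hcn⟩ := hco y (List.mem_cons_self)
    simp only [List.foldl_cons]
    obtain ⟨c1, c2, c3⟩ := stepCell_char h grid land new y
    have hst : pvStepCell h (grid, land, new) y =
        ((pvStepCell h (grid, land, new) y).1, (pvStepCell h (grid, land, new) y).2.1,
          (pvStepCell h (grid, land, new) y).2.2) := rfl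
    rw [hst]
    have hg1len : (pvStepCell h (grid, land, new) y).1.length = grid.length := by
      rw [c3]; exact setCell_len grid y.1 y.2 h
    have hg1row : ∀ j, rowLenP (pvStepCell h (grid, land, new) y).1 j = rowLenP grid j := by
      intro j; rw [c3]; exact setCell_rowLen grid y.1 y.2 h j
    obtain ⟨i1, i2, i3, i4, i5⟩ := ih (pvStepCell h (grid, land, new) y).1
      (pvStepCell h (grid, land, new) y).2.1 (pvStepCell h (grid, land, new) y).2.2
      (fun z hz => by
        obtain ⟨rz, cz, hzeq, hzr, hzc⟩ := hco z (List.mem_cons_of_mem y hz)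
        exact ⟨rz, cz, hzeq, by rwa [hg1len], by rwa [hg1row]⟩)
    refine ⟨fun x => ?_, fun x => ?_, by rwa [hg1len] at i3, fun j => by rw [i4, hg1row],
      fun r c hr hc => ?_⟩
    · rw [i1 x, c1 x]
      simp only [List.mem_cons]
      constructor
      · rintro ⟨⟨h1, h2⟩, h3⟩
        exact ⟨h1, fun z hz => by rcases hz with rfl | hz; exact h2; exact h3 z hz⟩
      · rintro ⟨h1, h2⟩
        exact ⟨⟨h1, h2 y (Or.inl rfl)⟩, fun z hz => h2 z (Or.inr hz)⟩
    · rw [i2 x, c2 x, c1 x]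
      simp only [List.mem_cons]
      constructor
      · rintro ((h' | ⟨h1, h2⟩) | ⟨⟨h1, h2⟩, z, hz, hx⟩)
        · exact Or.inl h'
        · exact Or.inr ⟨h1, y, Or.inl rfl, h2⟩
        · exact Or.inr ⟨h1, z, Or.inr hz, hx⟩
      · rintro (h' | ⟨h1, z, hz, hx⟩)
        · exact Or.inl (Or.inl h')
        · rcases hz with rfl | hz
          · exact Or.inl (Or.inr ⟨h1, hx⟩)
          · by_cases hnb : nbrFromP y x
            · exact Or.inl (Or.inr ⟨h1, hnb⟩)
            · exact Or.inr ⟨⟨h1, hnb⟩, z, hz, hx⟩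
    · rw [i5 r c (by rwa [hg1len]) (by rwa [hg1row])]
      simp only [List.mem_cons]
      by_cases hmem : ((r : Int), (c : Int)) ∈ rest
      · rw [if_pos hmem, if_pos (Or.inr hmem)]
      · rw [if_neg hmem]
        by_cases heq : ((r : Int), (c : Int)) = y
        · rw [if_pos (Or.inl heq), c3]
          subst hy
          have e1 : r = rn := Int.natCast_inj.mp (congrArg Prod.fst heq)
          have e2 : c = cn := Int.natCast_inj.mp (congrArg Prod.snd heq)
          rw [setCell_val grid rn cn h r c hr hc hcn, if_pos ⟨e1, e2⟩]
        · rw [if_neg (by rintro (h' | h'); exact heq h'; exact hmem h'), c3]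
          subst hy
          rw [setCell_val grid rn cn h r c hr hc hcn]
          rw [if_neg (fun ⟨e1, e2⟩ => heq (by rw [e1, e2]))]

def coordP (g : List (List Int)) (x : Int × Int) : Prop :=
  ∃ r c : Nat, x = ((r : Int), (c : Int)) ∧ r < g.length ∧ c < rowLenP g r
def adjP (d : PySem.Dict (Int × Int) Int) (x : Int × Int) : Prop :=
  (x.1 - 1, x.2) ∈ d.keys ∨ (x.1 + 1, x.2) ∈ d.keys ∨
    (x.1, x.2 - 1) ∈ d.keys ∨ (x.1, x.2 + 1) ∈ d.keys

lemma contains_ksm (d : PySem.Dict (Int × Int) Int) (k : Int × Int) :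
    d.contains k = true ↔ k ∈ d.keys := by
  exact PySem.Dict.contains_iff_mem_keys d k

lemma mem_pvLevel (g : List (List Int)) (d : PySem.Dict (Int × Int) Int) (x : Int × Int) :
    x ∈ pvLevel g d ↔ coordP g x ∧ x ∉ d.keys ∧ adjP d x := by
  simp only [pvLevel, List.mem_flatMap, List.mem_map, List.mem_filter]
  constructor
  · rintro ⟨rrow, hrr, c, ⟨hcr, hcond⟩, hx⟩
    obtain ⟨i, hi, h1, h2⟩ := (mem_enum g 0 rrow).1 hrr
    rw [PySem.List.mem_pyRange_one] at hcr
    simp only [Bool.and_eq_true, Bool.not_eq_true', Bool.or_eq_true] at hcond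
    obtain ⟨hnc, hadj⟩ := hcond
    obtain ⟨cn, rfl⟩ : ∃ cn : Nat, c = (cn : Int) := ⟨c.toNat, (Int.toNat_of_nonneg hcr.1).symm⟩
    rw [h1, zero_add] at hx hnc hadj
    refine ⟨⟨i, cn, ?_, hi, ?_⟩, ?_, ?_⟩
    · rw [← hx]
    · have : rrow.2.length = rowLenP g i := by simp [rowLenP, h2]
      rw [← this]; exact_mod_cast hcr.2
    · rw [← hx]
      intro hk
      rw [← contains_ksm] at hk
      simp [hk] at hnc
    · rw [← hx]
      simp only [adjP]
      rcases hadj with ((h | h) | h) | h <;>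
        [exact Or.inl ((contains_ksm _ _).1 h);
         exact Or.inr (Or.inl ((contains_ksm _ _).1 h));
         exact Or.inr (Or.inr (Or.inl ((contains_ksm _ _).1 h)));
         exact Or.inr (Or.inr (Or.inr ((contains_ksm _ _).1 h)))]
  · rintro ⟨⟨rn, cn, rfl, hrn, hcn⟩, hnk, hadj⟩
    have hrow : g[rn]? = some g[rn] := List.getElem?_eq_getElem hrn
    refine ⟨((rn : Int), g[rn]), ?_, (cn : Int), ⟨?_, ?_⟩, rfl⟩
    · exact (mem_enum g 0 _).2 ⟨rn, hrn, by simp, by simp [hrow]⟩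
    · rw [PySem.List.mem_pyRange_one]
      constructor
      · positivity
      · have : rowLenP g rn = g[rn].length := by simp [rowLenP, hrow]
        rw [this] at hcn; exact_mod_cast hcn
    · simp only [Bool.and_eq_true, Bool.not_eq_true', Bool.or_eq_true]
      constructor
      · rw [← Bool.not_eq_true, contains_ksm]; exact hnk
      · rcases hadj with h | h | h | h <;>
          rw [← contains_ksm] at h <;> simp [h]

lemma levelInsert (h : Int) (L : List (Int × Int)) :
    ∀ d : PySem.Dict (Int × Int) Int,
    (∀ x, x ∈ (L.foldl (fun d cell => d.insert cell h) d).keys ↔ x ∈ d.keys ∨ x ∈ L) ∧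
    (∀ x, (L.foldl (fun d cell => d.insert cell h) d).getD x 0 =
      if x ∈ L then h else d.getD x 0) := by
  induction L with
  | nil => intro d; simp
  | cons c rest ih =>
    intro d
    simp only [List.foldl_cons]
    refine ⟨fun x => ?_, fun x => ?_⟩
    · rw [(ih (d.insert c h)).1 x]
      simp only [PySem.Dict.mem_keys_insert, List.mem_cons]
      tauto
    · rw [(ih (d.insert c h)).2 x, PySem.Dict.getD_insert]
      simp only [List.mem_cons]
      by_cases h1 : x ∈ rest
      · rw [if_pos h1, if_pos (Or.inr h1)]
      · rw [if_neg h1]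
        by_cases h2 : x = c
        · rw [if_pos h2, if_pos (Or.inl h2)]
        · rw [if_neg h2, if_neg (by tauto)]

def pvRender (g : List (List Int)) (d : PySem.Dict (Int × Int) Int) : List (List Int) :=
  (PySem.List.enumerate g).map (fun rrow =>
    (PySem.List.pyRange 0 rrow.2.length 1).map (fun c => d.getD (rrow.1, c) 0))

def RgP (g : List (List Int)) (d : PySem.Dict (Int × Int) Int) (grid : List (List Int)) : Prop :=
  grid.length = g.length ∧ (∀ r : Nat, rowLenP grid r = rowLenP g r) ∧
    ∀ r c : Nat, r < g.length → c < rowLenP g r →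
      valP grid r c = d.getD ((r : Int), (c : Int)) 0

lemma render_eq (g : List (List Int)) (d : PySem.Dict (Int × Int) Int) (grid : List (List Int))
    (hg : RgP g d grid) : grid = pvRender g d := by
  obtain ⟨hlen, hrow, hval⟩ := hg
  apply List.ext_getElem
  · simp [pvRender, hlen]
  · intro r h1 h2
    have hr : r < g.length := by rwa [hlen] at h1
    have hrb : r < (PySem.List.enumerate g).length := by
      rw [length_enum]; exact hr
    have hrenum : (PySem.List.enumerate g)[r]'hrb = (0 + (r : Int), g[r]) := by
      rw [List.getElem_eq_iff hrb]
      rw [getElem?_enum g 0 r, List.getElem?_eq_getElem hr]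
      rfl
    simp only [pvRender, List.getElem_map, hrenum]
    have hgl : rowLenP grid r = grid[r].length := by
      simp [rowLenP, List.getElem?_eq_getElem h1]
    have hrl : rowLenP g r = g[r].length := by
      simp [rowLenP, List.getElem?_eq_getElem hr]
    apply List.ext_getElem
    · rw [PySem.List.pyRange_zero_natCast]
      simp [← hgl, hrow r, hrl]
    · intro c h3 h4
      have hc : c < rowLenP g r := by rw [← hrow r, hgl]; exact h3
      have hval' := hval r c hr hc
      have e1 : valP grid r c = grid[r][c] := by
        simp [valP, List.getElem?_eq_getElem h1, List.getElem?_eq_getElem h3]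
      rw [e1] at hval'
      rw [hval']
      simp only [PySem.List.pyRange_zero_natCast, List.getElem_map, List.getElem_range, zero_add]

lemma nbrFromP_swap (y x : Int × Int) :
    nbrFromP y x ↔
      (y = (x.1 - 1, x.2) ∨ y = (x.1 + 1, x.2) ∨ y = (x.1, x.2 - 1) ∨ y = (x.1, x.2 + 1)) := by
  obtain ⟨a, b⟩ := x; obtain ⟨p, q⟩ := y
  simp only [nbrFromP, Prod.ext_iff]
  omega

lemma exists_nbr (S : List (Int × Int)) (x : Int × Int) :
    (∃ y ∈ S, nbrFromP y x) ↔
      ((x.1 - 1, x.2) ∈ S ∨ (x.1 + 1, x.2) ∈ S ∨ (x.1, x.2 - 1) ∈ S ∨ (x.1, x.2 + 1) ∈ S) := by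
  constructor
  · rintro ⟨y, hy, hn⟩
    rw [nbrFromP_swap] at hn
    rcases hn with rfl | rfl | rfl | rfl <;> tauto
  · intro h
    rcases h with h | h | h | h
    · exact ⟨_, h, (nbrFromP_swap _ _).2 (Or.inl rfl)⟩
    · exact ⟨_, h, (nbrFromP_swap _ _).2 (Or.inr (Or.inl rfl))⟩
    · exact ⟨_, h, (nbrFromP_swap _ _).2 (Or.inr (Or.inr (Or.inl rfl)))⟩
    · exact ⟨_, h, (nbrFromP_swap _ _).2 (Or.inr (Or.inr (Or.inr rfl)))⟩

lemma pvLoopA_succ (F : Nat) (grid : List (List Int)) (land cells : PySem.Set (Int × Int))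
    (height : Int) :
    pvLoopA (F + 1) grid land cells height =
      if cells = [] then grid
      else
        pvLoopA F (cells.foldl (pvStepCell height) (grid, land, [])).1
          (cells.foldl (pvStepCell height) (grid, land, [])).2.1
          (cells.foldl (pvStepCell height) (grid, land, [])).2.2 (height + 1) := rfl

lemma pvLoopB_succ (F : Nat) (g : List (List Int)) (d : PySem.Dict (Int × Int) Int) (h : Int) :
    pvLoopB (F + 1) g d h =
      if pvLevel g d = [] then d
      else pvLoopB F g ((pvLevel g d).foldl (fun d cell => d.insert cell h) d) (h + 1) := rfl

lemma simLoop (g : List (List Int)) (F : Nat) :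
    ∀ (grid : List (List Int)) (land cells : PySem.Set (Int × Int)) (h : Int)
      (d : PySem.Dict (Int × Int) Int),
    (∀ x, x ∈ cells ↔ coordP g x ∧ x ∉ d.keys ∧ adjP d x) →
    (∀ x, x ∈ land ↔ coordP g x ∧ x ∉ d.keys ∧ ¬ adjP d x) →
    RgP g d grid →
    pvLoopA F grid land cells h = pvRender g (pvLoopB F g d h) := by
  induction F with
  | zero =>
    intro grid land cells h d hc hl hg
    exact render_eq g d grid hg
  | succ F ih =>
    intro grid land cells h d hc hl hg
    by_cases hnil : cells = []
    · have hlev : pvLevel g d = [] := by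
        rw [List.eq_nil_iff_forall_not_mem]
        intro x hx
        have hx' := (hc x).2 ((mem_pvLevel g d x).1 hx)
        rw [hnil] at hx'
        simp at hx'
      rw [pvLoopA_succ, pvLoopB_succ, if_pos hnil, if_pos hlev]
      exact render_eq g d grid hg
    · have hlevne : pvLevel g d ≠ [] := by
        obtain ⟨x, hx⟩ := List.exists_mem_of_ne_nil _ hnil
        intro h0
        have := (mem_pvLevel g d x).2 ((hc x).1 hx)
        rw [h0] at this
        simp at this
      rw [pvLoopA_succ, pvLoopB_succ, if_neg hnil, if_neg hlevne]
      have hco : ∀ y ∈ cells, ∃ rn cn : Nat, y = ((rn : Int), (cn : Int)) ∧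
          rn < grid.length ∧ cn < rowLenP grid rn := by
        intro y hy
        obtain ⟨⟨rn, cn, hyeq, hr, hcn⟩, _, _⟩ := (hc y).1 hy
        exact ⟨rn, cn, hyeq, by rw [hg.1]; exact hr, by rw [hg.2.1 rn]; exact hcn⟩
      obtain ⟨a1, a2, a3, a4, a5⟩ := cellsFold h cells grid land [] hco
      obtain ⟨k1, k2⟩ := levelInsert h (pvLevel g d) d
      have hlc : ∀ x, x ∈ pvLevel g d ↔ x ∈ cells := fun x => by
        rw [mem_pvLevel, hc]
      have hkeys : ∀ x,
          x ∈ ((pvLevel g d).foldl (fun d cell => d.insert cell h) d).keys ↔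
            x ∈ d.keys ∨ x ∈ cells := fun x => by rw [k1 x, hlc x]
      have hadj' : ∀ x, adjP ((pvLevel g d).foldl (fun d cell => d.insert cell h) d) x ↔
          adjP d x ∨ (∃ y ∈ cells, nbrFromP y x) := by
        intro x
        simp only [adjP, hkeys]
        rw [exists_nbr cells x]
        tauto
      apply ih
      · -- new cells
        intro x
        rw [a2 x, hadj' x]
        simp only [List.not_mem_nil, false_or, hl x, hkeys x]
        have hcx := hc x
        constructor
        · rintro ⟨⟨hcoo, hnk, hna⟩, hex⟩
          refine ⟨hcoo, ?_, Or.inr hex⟩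
          rintro (hk | hcc)
          · exact hnk hk
          · exact hna ((hcx.1 hcc).2.2)
        · rintro ⟨hcoo, hn2, hor⟩
          have hnk : x ∉ d.keys := fun hk => hn2 (Or.inl hk)
          have hncell : x ∉ cells := fun hk => hn2 (Or.inr hk)
          have hna : ¬ adjP d x := fun ha => hncell (hcx.2 ⟨hcoo, hnk, ha⟩)
          rcases hor with ha | hex
          · exact absurd ha hna
          · exact ⟨⟨hcoo, hnk, hna⟩, hex⟩
      · -- new land
        intro x
        rw [a1 x, hadj' x]
        simp only [hl x, hkeys x]
        have hcx := hc x
        constructor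
        · rintro ⟨⟨hcoo, hnk, hna⟩, hall⟩
          refine ⟨hcoo, ?_, ?_⟩
          · rintro (hk | hcc)
            · exact hnk hk
            · exact hna ((hcx.1 hcc).2.2)
          · rintro (ha | ⟨y, hy, hn⟩)
            · exact hna ha
            · exact hall y hy hn
        · rintro ⟨hcoo, hn2, hna'⟩
          have hnk : x ∉ d.keys := fun hk => hn2 (Or.inl hk)
          have hna : ¬ adjP d x := fun ha => hna' (Or.inl ha)
          exact ⟨⟨hcoo, hnk, hna⟩, fun y hy hn => hna' (Or.inr ⟨y, hy, hn⟩)⟩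
      · -- grid relation
        refine ⟨a3.trans hg.1, fun r => (a4 r).trans (hg.2.1 r), fun r c hr hcc => ?_⟩
        rw [a5 r c (by rw [hg.1]; exact hr) (by rw [hg.2.1 r]; exact hcc), k2]
        simp only [hlc]
        by_cases hm : ((r : Int), (c : Int)) ∈ cells
        · rw [if_pos hm, if_pos hm]
        · rw [if_neg hm, if_neg hm]
          exact hg.2.2 r c hr hcc

-- initial-state characterizations, specialised to start index 0 and empty accumulators
lemma initA_land (g : List (List Int)) (x : Int × Int) :
    x ∈ (pvInitA g).1 ↔ ∃ r c : Nat, r < g.length ∧ c < rowLenP g r ∧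
      x = ((r : Int), (c : Int)) ∧ valP g r c = 0 := by
  have h := (initA_outer g 0 ([], [])).1 x
  simp only [pvInitA, zero_add] at h ⊢
  rw [h]
  simp

lemma initA_water (g : List (List Int)) (x : Int × Int) :
    x ∈ (pvInitA g).2 ↔ ∃ r c : Nat, r < g.length ∧ c < rowLenP g r ∧
      x = ((r : Int), (c : Int)) ∧ valP g r c ≠ 0 := by
  have h := (initA_outer g 0 ([], [])).2 x
  simp only [pvInitA, zero_add] at h ⊢
  rw [h]
  simp

lemma initB_keys (g : List (List Int)) (x : Int × Int) :
    x ∈ (pvInitB g).keys ↔ ∃ r c : Nat, r < g.length ∧ c < rowLenP g r ∧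
      x = ((r : Int), (c : Int)) ∧ valP g r c ≠ 0 := by
  have h := (initB_outer g 0 PySem.Dict.empty).1 x
  simp only [pvInitB, zero_add] at h ⊢
  rw [h]
  simp [PySem.Dict.keys_empty]

lemma initB_getD (g : List (List Int)) (x : Int × Int) : (pvInitB g).getD x 0 = 0 := by
  have h := (initB_outer g 0 PySem.Dict.empty).2 (fun y => PySem.Dict.getD_empty y 0)
  simpa [pvInitB] using h x

-- water membership agrees between A's initial set and B's initial dict keys
lemma water_keys (g : List (List Int)) (x : Int × Int) :
    x ∈ (pvInitB g).keys ↔ x ∈ (pvInitA g).2 := by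
  rw [initB_keys, initA_water]

-- A's land is exactly: a coordinate not seeded into B's dict
lemma land_iff (g : List (List Int)) (x : Int × Int) :
    x ∈ (pvInitA g).1 ↔ coordP g x ∧ x ∉ (pvInitB g).keys := by
  rw [initA_land]
  constructor
  · rintro ⟨r, c, hr, hc, rfl, hv⟩
    refine ⟨⟨r, c, rfl, hr, hc⟩, fun hk => ?_⟩
    obtain ⟨r', c', _, _, heq, hv'⟩ := (initB_keys g _).1 hk
    have e1 : r' = r := Int.natCast_inj.mp (congrArg Prod.fst heq).symm
    have e2 : c' = c := Int.natCast_inj.mp (congrArg Prod.snd heq).symm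
    rw [e1, e2] at hv'
    exact hv' hv
  · rintro ⟨⟨r, c, rfl, hr, hc⟩, hnk⟩
    refine ⟨r, c, hr, hc, rfl, ?_⟩
    by_contra hv
    exact hnk ((initB_keys g _).2 ⟨r, c, hr, hc, rfl, hv⟩)

-- ===== VERDICT (by name: the statement is the Claim_ definition above) =====
theorem solution_1199_5_spec : Claim_equal_solution_1199_5 := by
  unfold Claim_equal_solution_1199_5 Spec_solution_1199_5
  intro g _
  show pvLoopA (pvFuel g + 1) g (pvInitA g).1 (pvInitA g).2 0 =
    pvRender g (pvLoopB (pvFuel g) g (pvInitB g) 1)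
  have hadjw : ∀ x, adjP (pvInitB g) x ↔ ∃ y ∈ (pvInitA g).2, nbrFromP y x := by
    intro x
    simp only [adjP, water_keys]
    rw [exists_nbr]
  by_cases hw : (pvInitA g).2 = []
  · -- no water at all: A returns the grid unchanged, B renders its untouched seed dict
    rw [pvLoopA_succ, if_pos hw]
    have noW : ∀ x, x ∉ (pvInitB g).keys := fun x hk => by
      have := (water_keys g x).1 hk
      rw [hw] at this
      simp at this
    have allz : ∀ r c : Nat, r < g.length → c < rowLenP g r → valP g r c = 0 := by
      intro r c hr hc
      by_contra hv
      exact noW _ ((initB_keys g _).2 ⟨r, c, hr, hc, rfl, hv⟩)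
    have hRg : RgP g (pvInitB g) g :=
      ⟨rfl, fun _ => rfl, fun r c hr hc => by rw [initB_getD]; exact allz r c hr hc⟩
    have hBfix : pvLoopB (pvFuel g) g (pvInitB g) 1 = pvInitB g := by
      cases hF : pvFuel g with
      | zero => rfl
      | succ F =>
        rw [pvLoopB_succ]
        rw [if_pos ?_]
        rw [List.eq_nil_iff_forall_not_mem]
        intro x hx
        obtain ⟨_, _, hadj⟩ := (mem_pvLevel g _ x).1 hx
        obtain ⟨y, hy, _⟩ := (hadjw x).1 hadj
        rw [hw] at hy
        simp at hy
    rw [hBfix]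
    exact render_eq g (pvInitB g) g hRg
  · -- at least one water cell: peel A's first (height 0) iteration, then simulate
    rw [pvLoopA_succ, if_neg hw]
    have hcoW : ∀ y ∈ (pvInitA g).2, ∃ rn cn : Nat, y = ((rn : Int), (cn : Int)) ∧
        rn < g.length ∧ cn < rowLenP g rn := by
      intro y hy
      obtain ⟨r, c, hr, hc, rfl, _⟩ := (initA_water g y).1 hy
      exact ⟨r, c, rfl, hr, hc⟩
    obtain ⟨b1, b2, b3, b4, b5⟩ := cellsFold 0 ((pvInitA g).2) g ((pvInitA g).1) [] hcoW
    apply simLoop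
    · intro x
      rw [b2 x, land_iff]
      simp only [List.not_mem_nil, false_or, hadjw]
      tauto
    · intro x
      rw [b1 x, land_iff]
      have : (∀ y ∈ (pvInitA g).2, ¬ nbrFromP y x) ↔ ¬ ∃ y ∈ (pvInitA g).2, nbrFromP y x := by
        simp
      rw [this, hadjw]
      tauto
    · refine ⟨b3, b4, fun r c hr hc => ?_⟩
      rw [b5 r c hr hc, initB_getD]
      by_cases hm : ((r : Int), (c : Int)) ∈ (pvInitA g).2
      · rw [if_pos hm]
      · rw [if_neg hm]
        by_contra hv
        exact hm ((initA_water g _).2 ⟨r, c, hr, hc, rfl, hv⟩)
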